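-- pv_equiv track=rewrite | github.com/peterdekker/prediction-histling | dataset/data.py | split_predictions
-- ===== SOURCE A (Python) =====
-- def split_predictions(predictions, word_lengths):
--     start = 0
--     predictions_split = []
--     for length in word_lengths:
--         end = start + length
--         predictions_split.append(predictions[start:end])
--         start = end
--     return predictions_split
-- ===== SOURCE B (Python) =====
-- from itertools import accumulate
--
-- def split_predictions(predictions, word_lengths):
--     offsets = list(accumulate(word_lengths))
--     return [predictions[s:e] for s, e in zip([0] + offsets, offsets)]
-- ===== Notes on version B (the rewrite author's own statement) =====
-- stated objective: alternative
-- what changed: Replaces the mutable running-start loop with two separate passes: a prefix-sum boundary table via itertools.accumulate, then a zip of consecutive boundaries driving the slices.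
import Mathlib
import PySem

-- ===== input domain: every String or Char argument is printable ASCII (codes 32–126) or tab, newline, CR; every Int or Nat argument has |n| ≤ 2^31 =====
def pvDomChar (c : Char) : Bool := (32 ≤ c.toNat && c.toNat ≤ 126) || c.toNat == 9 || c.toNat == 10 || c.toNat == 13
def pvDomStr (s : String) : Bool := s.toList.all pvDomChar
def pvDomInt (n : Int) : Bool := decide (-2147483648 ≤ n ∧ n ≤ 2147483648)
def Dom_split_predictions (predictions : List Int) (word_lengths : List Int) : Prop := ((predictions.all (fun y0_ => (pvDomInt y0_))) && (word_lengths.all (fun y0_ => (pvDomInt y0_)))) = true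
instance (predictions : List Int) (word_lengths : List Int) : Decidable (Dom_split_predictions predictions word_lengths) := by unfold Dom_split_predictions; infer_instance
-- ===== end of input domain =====

-- B separates boundary computation (prefix sums) from slicing (zip of consecutive boundaries); same values, different decomposition.
-- ===== PORT A =====
-- A's for-loop threading `start`, producing the chunks in order (structural recursion over word_lengths with the running start).
def split_predictions_loop (predictions : List Int) (start : Int) : List Int → List (List Int)
  | [] => []
  | length :: rest =>
      PySem.List.slice predictions (some start) (some (start + length)) ::
        split_predictions_loop predictions (start + length) rest

def split_predictions (predictions : List Int) (word_lengths : List Int) : List (List Int) :=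
  split_predictions_loop predictions 0 word_lengths

-- ===== PORT B =====
-- Source B: offsets = list(accumulate(word_lengths)); [predictions[s:e] for s,e in zip([0]+offsets, offsets)]
def split_predictions_alt (predictions : List Int) (word_lengths : List Int) : List (List Int) :=
  let offsets : List Int := (List.scanl (· + ·) 0 word_lengths).drop 1
  (List.zip (0 :: offsets) offsets).map
    (fun p => PySem.List.slice predictions (some p.1) (some p.2))

-- ===== PRECONDITION & SPEC =====
def Spec_split_predictions (predictions : List Int) (word_lengths : List Int) (out : List (List Int)) : Prop := out = split_predictions_alt predictions word_lengths
instance (predictions : List Int) (word_lengths : List Int) (out : List (List Int)) : Decidable (Spec_split_predictions predictions word_lengths out) := by unfold Spec_split_predictions; infer_instance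

-- ===== CLAIM (what is proved, stated in full; the proofs are below) =====
def Claim_equal_split_predictions : Prop := ∀ (predictions : List Int) (word_lengths : List Int), Dom_split_predictions predictions word_lengths → Spec_split_predictions predictions word_lengths (split_predictions predictions word_lengths)

-- ===== LEMMAS AND PROOFS =====

-- ===== VERDICT (by name: the statement is the Claim_ definition above) =====
-- Loop characterisation: A's loop from start s equals the zip of consecutive prefix sums seeded at s.
theorem split_predictions_loop_eq (predictions : List Int) (s : Int) (ws : List Int) :
    split_predictions_loop predictions s ws =
      (List.zip (List.scanl (· + ·) s ws) ((List.scanl (· + ·) s ws).drop 1)).map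
        (fun p => PySem.List.slice predictions (some p.1) (some p.2)) := by
  induction ws generalizing s with
  | nil => simp [split_predictions_loop]
  | cons w rest ih =>
      cases rest with
      | nil => simp [split_predictions_loop]
      | cons w' rest' =>
          have h := ih (s + w)
          simp only [split_predictions_loop, List.scanl_cons, List.drop, List.zip_cons_cons,
            List.map_cons] at h ⊢
          rw [h]

theorem split_predictions_spec : Claim_equal_split_predictions := by
  intro predictions word_lengths _
  unfold Spec_split_predictions split_predictions split_predictions_alt
  rw [split_predictions_loop_eq]
  cases word_lengths with
  | nil => simp
  | cons w rest => simp [List.scanl_cons]
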